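-- pv_equiv track=rewrite | github.com/FlavioFRibeiro/rag_restaurants_provider | src/ingest/menu_parser.py | _is_bad_title_baseline
-- ===== SOURCE A (Python) =====
-- _BAD_TITLES = {
--     "menu",
--     "atto",
--     "prezzo",
--     "chef",
--     "ingredienti",
--     "tecniche",
--     "licenze",
--     "techniques",
--     "ristorante",
-- }
--
-- def _is_bad_title_baseline(line: str) -> bool:
--     lowered = line.lower()
--     if lowered in _BAD_TITLES:
--         return True
--     for token in _BAD_TITLES:
--         if lowered.startswith(f"{token} "):
--             return True
--     return False
-- ===== SOURCE B (Python) =====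
-- _BAD_TITLES = {
--     "menu",
--     "atto",
--     "prezzo",
--     "chef",
--     "ingredienti",
--     "tecniche",
--     "licenze",
--     "techniques",
--     "ristorante",
-- }
--
-- def _is_bad_title_baseline(line: str) -> bool:
--     # The word before the first literal space (or the whole lowered line if
--     # there is none) is a bad title exactly when A's exact-match or prefix
--     # branch fires, so one membership test suffices.
--     return line.lower().split(" ", 1)[0] in _BAD_TITLES
-- ===== Notes on version B (the rewrite author's own statement) =====
-- stated objective: simpler
-- what changed: The exact-match test plus the loop checking each bad word followed by a space as a prefix is replaced by splitting off the first space-delimited segment once and doing a single set-membership test on it.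
import Mathlib
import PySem

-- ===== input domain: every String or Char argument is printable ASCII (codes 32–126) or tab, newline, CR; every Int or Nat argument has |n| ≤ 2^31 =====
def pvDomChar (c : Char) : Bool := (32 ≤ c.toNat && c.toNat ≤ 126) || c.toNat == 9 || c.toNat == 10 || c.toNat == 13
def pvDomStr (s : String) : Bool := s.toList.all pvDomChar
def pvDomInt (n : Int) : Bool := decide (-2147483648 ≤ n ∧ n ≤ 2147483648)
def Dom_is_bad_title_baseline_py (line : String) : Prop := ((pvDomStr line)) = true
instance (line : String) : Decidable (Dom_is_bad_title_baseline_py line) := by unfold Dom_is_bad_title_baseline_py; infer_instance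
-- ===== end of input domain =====

-- B replaces A's exact-match test plus prefix loop by one membership test on the
-- segment before the first space (objective: simpler; return values are identical).

-- ===== PORT A =====
-- the module constant _BAD_TITLES (a set of distinct string literals)
def pvBadTitlesA : PySem.Set String :=
  PySem.Set.ofList ["menu", "atto", "prezzo", "chef", "ingredienti", "tecniche",
                    "licenze", "techniques", "ristorante"]

def is_bad_title_baseline_py (line : String) : Bool :=
  let lowered := PySem.Str.lower line
  if PySem.Set.contains pvBadTitlesA lowered then true
  else
    -- 'for token in _BAD_TITLES: if lowered.startswith(f"{token} "): return true'
    pvBadTitlesA.any (fun token =>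
      PySem.Str.startswith lowered (PySem.Str.join "" [token, " "]))

-- ===== PORT B =====
def pvBadTitlesB : PySem.Set String :=
  PySem.Set.ofList ["menu", "atto", "prezzo", "chef", "ingredienti", "tecniche",
                    "licenze", "techniques", "ristorante"]

def is_bad_title_baseline_py_alt (line : String) : Bool :=
  -- line.lower().split(" ", 1)[0] in _BAD_TITLES
  -- split(" ", 1) (non-empty separator) always returns a non-empty list, so the
  -- [0] indexing never raises; the catch-all arm is unreachable.
  match PySem.Str.splitMax? (PySem.Str.lower line) " " 1 with
  | some (head :: _) => PySem.Set.contains pvBadTitlesB head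
  | _ => false

-- ===== PRECONDITION & SPEC =====
def Spec_is_bad_title_baseline_py (line : String) (out : Bool) : Prop := out = is_bad_title_baseline_py_alt line
instance (line : String) (out : Bool) : Decidable (Spec_is_bad_title_baseline_py line out) := by unfold Spec_is_bad_title_baseline_py; infer_instance

-- ===== CLAIM (what is proved, stated in full; the proofs are below) =====
def Claim_equal_is_bad_title_baseline_py : Prop := ∀ (line : String), Dom_is_bad_title_baseline_py line → Spec_is_bad_title_baseline_py line (is_bad_title_baseline_py line)

-- ===== LEMMAS AND PROOFS =====

-- splitOnMax.go is invariant in its accumulator (pushed pieces sit in front)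
lemma pv_go_acc (sep : List Char) (fuel m : Nat) (l cur : List Char) (acc : List (List Char)) :
    PySem.Chars.splitOnMax.go sep fuel m l cur acc =
      acc.reverse ++ PySem.Chars.splitOnMax.go sep fuel m l cur [] := by
  induction fuel generalizing m l cur acc with
  | zero => simp [PySem.Chars.splitOnMax.go]
  | succ n ih =>
    cases l with
    | nil => simp [PySem.Chars.splitOnMax.go]
    | cons c rest =>
      simp only [PySem.Chars.splitOnMax.go]
      split_ifs with h1 h2
      · simp
      · rw [ih, ih (acc := [cur.reverse])]; simp
      · exact ih _ _ _ _

-- the first piece of s.split(" ", 1) is the run of non-space characters, cur-prefixed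
lemma pv_go_head (fuel : Nat) (l cur : List Char) (h : l.length < fuel) :
    (PySem.Chars.splitOnMax.go [' '] fuel 1 l cur []).head? =
      some (cur.reverse ++ l.takeWhile (· != ' ')) := by
  induction fuel generalizing l cur with
  | zero => omega
  | succ n ih =>
    cases l with
    | nil => simp [PySem.Chars.splitOnMax.go]
    | cons c rest =>
      by_cases hc : c = ' '
      · subst hc
        rw [show PySem.Chars.splitOnMax.go [' '] (n+1) 1 (' ' :: rest) cur [] =
              PySem.Chars.splitOnMax.go [' '] n 0 rest [] [cur.reverse] by
            simp [PySem.Chars.splitOnMax.go, List.isPrefixOf]]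
        rw [pv_go_acc]
        simp [List.takeWhile]
      · rw [show PySem.Chars.splitOnMax.go [' '] (n+1) 1 (c :: rest) cur [] =
              PySem.Chars.splitOnMax.go [' '] n 1 rest (c :: cur) [] by
            rw [PySem.Chars.splitOnMax.go]
            rw [if_neg one_ne_zero, if_neg (by simp; intro e; exact absurd e.symm hc)]]
        rw [ih rest (c :: cur) (by simp at h ⊢; omega)]
        have hb : (c != ' ') = true := by simp [hc]
        simp [List.takeWhile, hb]

lemma pv_head_splitOnMax (cs : List Char) :
    ∃ rest, PySem.Chars.splitOnMax cs [' '] 1 = cs.takeWhile (· != ' ') :: rest := by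
  have h := pv_go_head (cs.length + 1) cs [] (by omega)
  unfold PySem.Chars.splitOnMax
  rw [if_neg (by norm_num)]
  rcases he : PySem.Chars.splitOnMax.go [' '] (cs.length + 1) 1 cs [] [] with _ | ⟨x, xs⟩
  · rw [he] at h; simp at h
  · rw [he] at h; simp at h
    exact ⟨xs, by simp only [Int.toNat_one]; rw [he, h]⟩

lemma pv_key (t : List Char) (cs : List Char) (ht : ' ' ∉ t) :
    (cs = t ∨ (t ++ [' ']) <+: cs) ↔ cs.takeWhile (· != ' ') = t := by
  induction t generalizing cs with
  | nil =>
    cases cs with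
    | nil => simp
    | cons c rest =>
      by_cases hc : c = ' '
      · subst hc; simp [List.takeWhile, List.prefix_cons_iff]
      · have hb : (c != ' ') = true := by simp [hc]
        simp only [List.nil_append, List.takeWhile_cons, hb, if_true]
        constructor
        · rintro (e | hp)
          · exact absurd e (by simp)
          · exact absurd (List.cons_prefix_cons.mp hp).1 fun e => hc e.symm
        · intro e; simp at e
  | cons a t' ih =>
    have ha : a ≠ ' ' := fun e => ht (e ▸ List.mem_cons_self)
    have ht' : ' ' ∉ t' := fun m => ht (List.mem_cons_of_mem _ m)
    cases cs with
    | nil => simp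
    | cons c rest =>
      by_cases hc : c = a
      · subst hc
        have hb : (c != ' ') = true := by simp [ha]
        simp only [List.cons_append, List.takeWhile_cons, hb, if_true, List.cons_prefix_cons,
          List.cons.injEq, true_and]
        rw [← ih rest ht']
      · constructor
        · rintro (e | hp)
          · exact absurd (List.cons.injEq .. ▸ e).1 hc
          · exact absurd (List.cons_prefix_cons.mp hp).1 fun e => hc e.symm
        · intro e
          by_cases hsp : c = ' '
          · subst hsp; simp [List.takeWhile] at e
          · have hb : (c != ' ') = true := by simp [hsp]
            simp [List.takeWhile, hb] at e; exact absurd e.1 hc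

-- ===== VERDICT (by name: the statement is the Claim_ definition above) =====
theorem is_bad_title_baseline_py_spec : Claim_equal_is_bad_title_baseline_py := by
  intro line _
  unfold Spec_is_bad_title_baseline_py
  rw [Bool.eq_iff_iff]
  set lowered := PySem.Str.lower line with hlow
  set cs : List Char := lowered.toList with hcs
  obtain ⟨rest, hsplit⟩ := pv_head_splitOnMax cs
  have hL : pvBadTitlesA = ["menu", "atto", "prezzo", "chef", "ingredienti", "tecniche",
      "licenze", "techniques", "ristorante"] := by rfl
  have hLB : pvBadTitlesB = pvBadTitlesA := by rfl
  have hjoin : ∀ t : String, (PySem.Str.join "" [t, " "]).toList = t.toList ++ [' '] := by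
    intro t; rw [PySem.Str.toList_join]; simp [PySem.Chars.join, List.intercalate]
  have hA : is_bad_title_baseline_py line = true ↔
      ∃ t ∈ pvBadTitlesA, (cs = t.toList ∨ (t.toList ++ [' ']) <+: cs) := by
    simp only [is_bad_title_baseline_py, ← hlow]
    cases hctest : PySem.Set.contains pvBadTitlesA lowered with
    | true =>
      have hm := (PySem.Set.contains_iff _ _).mp hctest
      simp only [if_true]
      exact iff_of_true trivial ⟨lowered, hm, Or.inl rfl⟩
    | false =>
      simp only [Bool.false_eq_true, if_false, List.any_eq_true]
      constructor
      · rintro ⟨t, htm, hs⟩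
        refine ⟨t, htm, Or.inr ?_⟩
        rw [PySem.Str.startswith_eq] at hs
        have h2 := (PySem.Chars.startswith_iff _ _).mp hs
        rwa [hjoin t] at h2
      · rintro ⟨t, htm, he | hp⟩
        · exfalso
          have : lowered = t := String.toList_inj.mp he
          have : PySem.Set.contains pvBadTitlesA lowered = true :=
            (PySem.Set.contains_iff _ _).mpr (this ▸ htm)
          rw [hctest] at this; exact Bool.false_ne_true this
        · refine ⟨t, htm, ?_⟩
          rw [PySem.Str.startswith_eq]
          refine (PySem.Chars.startswith_iff _ _).mpr ?_
          rwa [hjoin t]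
  have hB : is_bad_title_baseline_py_alt line = true ↔
      ∃ t ∈ pvBadTitlesA, cs.takeWhile (· != ' ') = t.toList := by
    simp only [is_bad_title_baseline_py_alt, PySem.Str.splitMax?, PySem.Chars.splitMax?, ← hlow]
    rw [show (" ".toList.isEmpty) = false by rfl]
    simp only [Bool.false_eq_true, if_false, ← hcs,
      show " ".toList = [' '] from rfl, hsplit, Option.map_some, List.map_cons]
    rw [PySem.Set.contains_iff, hLB]
    constructor
    · intro hm
      exact ⟨_, hm, (String.toList_ofList).symm⟩
    · rintro ⟨t, htm, he⟩
      have h3 : String.ofList (cs.takeWhile (· != ' ')) = t :=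
        String.toList_inj.mp (by rw [String.toList_ofList, he])
      rwa [h3]
  rw [hA, hB]
  have hsp : ∀ t ∈ pvBadTitlesA, ' ' ∉ t.toList := by rw [hL]; decide
  constructor
  · rintro ⟨t, htm, hd⟩
    exact ⟨t, htm, (pv_key t.toList cs (hsp t htm)).mp hd⟩
  · rintro ⟨t, htm, he⟩
    exact ⟨t, htm, (pv_key t.toList cs (hsp t htm)).mpr he⟩
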